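-- pv_equiv track=rewrite | github.com/pypi-data/pypi-mirror-125 | packages/mnl-ws-norm/mnl_ws_norm-0.0.2-py3-none-any.whl/mnl_ws_norm/normalizer.py | norm_spaces
-- ===== SOURCE A (Python) =====
-- def trim_result(result):
--     beginning_spaces = 0
--
--     for i in range(len(result)):
--         if result[i].isspace():
--             beginning_spaces+=1
--
--         else:
--             break
--
--     if beginning_spaces > 1:
--         result = result[i:]
--
--     ending_spaces = 0
--     j = len(result)-1
--
--     while j >= 0:
--         current_char = result[j]
--         if current_char.isspace():
--             ending_spaces+=1
--             j-=1
--
--         else: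
--             break
--
--     if ending_spaces > 1:
--         result = result[:j+1]
--
--     return result
--
-- def get_category(char):
--     if char.isspace():
--         return "SPACE"
--
--     return "NOTSPACE"
--
-- def norm_spaces(input_str, space_type, remove_extra_spaces = False):
--     if type(input_str) != str or type(space_type) != str:
--         return input_str
--
--     if len(input_str) == 0:
--         return input_str
--
--     result = ""
--     last_category = ""
--     last_replacement = None
--     string_len = len(input_str)
--
--     for i in range (string_len):
--         current_char = input_str[i]
--         current_category = get_category(current_char)
--
--         if current_category == "SPACE":
--             if (last_category == "SPACE" and remove_extra_spaces == False) or last_category != "SPACE":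
--                 result+= (input_str[0 if last_replacement == None else last_replacement + 1: i] + space_type)
--
--             last_replacement = i
--
--             last_category = current_category
--             continue
--
--         last_category = current_category
--
--     if last_replacement == None:
--         return input_str
--
--     if last_replacement < string_len - 1:
--         result+=input_str[last_replacement+1:]
--
--     return result if remove_extra_spaces == False else trim_result(result)
-- ===== SOURCE B (Python) =====
-- # trim_result is the module's own helper, reused verbatim.
-- def trim_result(result):
--     beginning_spaces = 0
--
--     for i in range(len(result)):
--         if result[i].isspace():
--             beginning_spaces+=1
--
--         else:
--             break
--
--     if beginning_spaces > 1:
--         result = result[i:]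
--
--     ending_spaces = 0
--     j = len(result)-1
--
--     while j >= 0:
--         current_char = result[j]
--         if current_char.isspace():
--             ending_spaces+=1
--             j-=1
--
--         else:
--             break
--
--     if ending_spaces > 1:
--         result = result[:j+1]
--
--     return result
--
-- def norm_spaces(input_str, space_type, remove_extra_spaces = False):
--     if type(input_str) != str or type(space_type) != str:
--         return input_str
--     if len(input_str) == 0:
--         return input_str
--
--     # split the string into maximal runs of whitespace / non-whitespace
--     runs = []
--     n = len(input_str)
--     i = 0
--     while i < n:
--         sp = input_str[i].isspace()
--         j = i
--         while j < n and input_str[j].isspace() == sp: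
--             j += 1
--         runs.append((sp, input_str[i:j]))
--         i = j
--
--     if all(not sp for sp, _ in runs):
--         return input_str
--
--     parts = []
--     for sp, run in runs:
--         if not sp:
--             parts.append(run)
--         elif remove_extra_spaces:
--             parts.append(space_type)
--         else:
--             parts.append(space_type * len(run))
--     result = ''.join(parts)
--     return trim_result(result) if remove_extra_spaces else result
-- ===== Notes on version B (the rewrite author's own statement) =====
-- stated objective: alternative
-- what changed: A's index-based state machine (last_category/last_replacement with repeated string slicing) is replaced by splitting the string once into maximal whitespace/non-whitespace runs and mapping each run to its replacement; the module helper trim_result is reused verbatim.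
import Mathlib
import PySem

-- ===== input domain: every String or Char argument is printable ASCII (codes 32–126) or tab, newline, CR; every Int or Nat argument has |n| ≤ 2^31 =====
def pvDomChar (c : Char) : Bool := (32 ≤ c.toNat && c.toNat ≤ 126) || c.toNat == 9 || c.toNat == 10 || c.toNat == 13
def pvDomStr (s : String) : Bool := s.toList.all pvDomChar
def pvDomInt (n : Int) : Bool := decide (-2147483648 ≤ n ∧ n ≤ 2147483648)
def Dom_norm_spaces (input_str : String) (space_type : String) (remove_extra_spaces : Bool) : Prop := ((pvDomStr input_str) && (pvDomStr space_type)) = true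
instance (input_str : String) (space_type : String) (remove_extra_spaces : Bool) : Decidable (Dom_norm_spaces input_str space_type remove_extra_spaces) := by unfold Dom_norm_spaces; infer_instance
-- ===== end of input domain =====

-- B replaces A's index/slice state machine by splitting the string into maximal whitespace runs once,
-- reusing the module helper trim_result verbatim (objective: alternative; same cost).

-- ===== PORT A =====
-- trim_result: leading scan ('for i in range(len(result))' with break); returns (beginning_spaces, i).
-- When the loop exhausts, Python leaves i = len-1; on the empty string i is unbound but unused (count = 0).
def trimLeadGoA : List Char → Nat → Nat → Nat × Nat
  | [], i, cnt => (cnt, i - 1)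
  | c :: rest, i, cnt =>
    if PySem.Chars.isspace c then trimLeadGoA rest (i + 1) (cnt + 1) else (cnt, i)

-- trailing 'while j >= 0' scan; jp = j + 1 (so j : Int can end at -1); returns (j, ending_spaces)
def trimTrailGoA (res : List Char) : Nat → Nat → Int × Nat
  | 0, es => (-1, es)
  | jp' + 1, es =>
    match PySem.List.pyGet? res (jp' : Int) with
    | some c => if PySem.Chars.isspace c then trimTrailGoA res jp' (es + 1) else ((jp' : Int), es)
    | none => ((jp' : Int), es)  -- unreachable: jp' < res.length at every call

def trim_result (result : List Char) : List Char :=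
  let (beginning_spaces, i) := trimLeadGoA result 0 0
  let result := if beginning_spaces > 1 then PySem.List.slice result (some (i : Int)) none else result
  let (j, ending_spaces) := trimTrailGoA result result.length 0
  if ending_spaces > 1 then PySem.List.slice result none (some (j + 1)) else result

def get_category (c : Char) : String :=
  if PySem.Chars.isspace c then "SPACE" else "NOTSPACE"

-- the 'for i in range(string_len)' loop: remaining chars cs.drop i, state (result, last_category, last_replacement)
def loopA (cs st : List Char) (rm : Bool) :
    List Char → Nat → List Char × String × Option Nat → List Char × String × Option Nat
  | [], _, acc => acc
  | c :: rest, i, (result, last_category, last_replacement) =>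
    let current_category := get_category c
    if current_category = "SPACE" then
      let result :=
        if (last_category = "SPACE" ∧ rm = false) ∨ last_category ≠ "SPACE" then
          result ++ PySem.List.slice cs
            (some (match last_replacement with | none => (0 : Int) | some lr => (lr : Int) + 1))
            (some (i : Int)) ++ st
        else result
      loopA cs st rm rest (i + 1) (result, current_category, some i)
    else
      loopA cs st rm rest (i + 1) (result, current_category, last_replacement)

def norm_spaces (input_str : String) (space_type : String) (remove_extra_spaces : Bool) : String :=
  -- Python's 'type(...) != str' guard can never fire under this signature
  let cs := input_str.toList
  if cs.length = 0 then input_str else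
  let string_len := cs.length
  match loopA cs space_type.toList remove_extra_spaces cs 0 ([], "", none) with
  | (result, _, last_replacement) =>
    match last_replacement with
    | none => input_str
    | some lr =>
      let result :=
        if lr < string_len - 1 then result ++ PySem.List.slice cs (some ((lr : Int) + 1)) none
        else result
      if remove_extra_spaces = false then String.ofList result
      else String.ofList (trim_result result)

-- ===== PORT B =====
-- Source B reuses the module helper trim_result VERBATIM, so its port is the shared def trim_result above.
-- the outer while loop: each step cuts off one maximal same-isspace run (the inner while)
def runsOfB (cs : List Char) : List (Bool × List Char) :=
  match cs with
  | [] => []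
  | c :: rest =>
    let sp := PySem.Chars.isspace c
    (sp, c :: rest.takeWhile (fun d => PySem.Chars.isspace d = sp)) ::
      runsOfB (rest.dropWhile (fun d => PySem.Chars.isspace d = sp))
termination_by cs.length
decreasing_by
  simpa using Nat.lt_succ_of_le (List.length_dropWhile_le _ _)

def norm_spaces_alt (input_str : String) (space_type : String) (remove_extra_spaces : Bool) : String :=
  let cs := input_str.toList
  if cs.length = 0 then input_str else
  let runs := runsOfB cs
  if runs.all (fun r => r.1 = false) then input_str
  else
    let result := (runs.map (fun r =>
      if r.1 = false then r.2
      else if remove_extra_spaces then space_type.toList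
      else (List.replicate r.2.length space_type.toList).flatten)).flatten
    if remove_extra_spaces then String.ofList (trim_result result)
    else String.ofList result

-- ===== PRECONDITION & SPEC =====
def Spec_norm_spaces (input_str : String) (space_type : String) (remove_extra_spaces : Bool) (out : String) : Prop := out = norm_spaces_alt input_str space_type remove_extra_spaces
instance (input_str : String) (space_type : String) (remove_extra_spaces : Bool) (out : String) : Decidable (Spec_norm_spaces input_str space_type remove_extra_spaces out) := by unfold Spec_norm_spaces; infer_instance

-- ===== CLAIM (what is proved, stated in full; the proofs are below) =====
def Claim_equal_norm_spaces : Prop := ∀ (input_str : String) (space_type : String) (remove_extra_spaces : Bool), Dom_norm_spaces input_str space_type remove_extra_spaces → Spec_norm_spaces input_str space_type remove_extra_spaces (norm_spaces input_str space_type remove_extra_spaces)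

-- ===== LEMMAS AND PROOFS =====

-- the common character-by-character specification both programs compute
def coreC (st : List Char) (rm : Bool) : List Char → Bool → List Char
  | [], _ => []
  | c :: rest, prev =>
    if PySem.Chars.isspace c then
      (if prev && rm then [] else st) ++ coreC st rm rest true
    else c :: coreC st rm rest false

-- the 'previous char was a space' flag after processing xs, starting from prev
def prevAfterC (xs : List Char) (prev : Bool) : Bool :=
  match xs.getLast? with
  | some d => PySem.Chars.isspace d
  | none => prev

-- the invariant of A's main loop: lr = index of the last space seen, result = processed prefix
def InvLR (st : List Char) (rm : Bool) (done result : List Char) (lr : Option Nat) : Prop :=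
  match lr with
  | none => (∀ c ∈ done, PySem.Chars.isspace c = false) ∧ result = []
  | some r => r < done.length ∧ PySem.Chars.isspace (done.getD r 'x') = true ∧
      (∀ c ∈ done.drop (r + 1), PySem.Chars.isspace c = false) ∧
      result = coreC st rm (done.take (r + 1)) false

theorem coreC_append (st : List Char) (rm : Bool) (xs ys : List Char) (prev : Bool) :
    coreC st rm (xs ++ ys) prev = coreC st rm xs prev ++ coreC st rm ys (prevAfterC xs prev) := by
  induction xs generalizing prev with
  | nil => simp [coreC, prevAfterC]
  | cons c rest ih =>
    have hpa : prevAfterC (c :: rest) prev = prevAfterC rest (PySem.Chars.isspace c) := by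
      cases rest with
      | nil => simp [prevAfterC]
      | cons d t =>
        obtain ⟨y, hy⟩ : ∃ y, (d :: t).getLast? = some y := ⟨_, List.getLast?_eq_some_getLast (by simp)⟩
        simp [prevAfterC, hy]
    by_cases h : PySem.Chars.isspace c <;>
      simp [coreC, h, List.cons_append, ih, hpa, List.append_assoc]

theorem coreC_nonspace (st : List Char) (rm : Bool) (ns : List Char) (prev : Bool)
    (h : ∀ c ∈ ns, PySem.Chars.isspace c = false) : coreC st rm ns prev = ns := by
  induction ns generalizing prev with
  | nil => rfl
  | cons c rest ih =>
    have hc := h c (by simp)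
    simp only [coreC, hc, Bool.false_eq_true, if_false, List.cons.injEq, true_and]
    exact ih false fun d hd => h d (List.mem_cons_of_mem _ hd)

theorem coreC_allspace (st : List Char) (rm : Bool) (xs : List Char)
    (h : ∀ c ∈ xs, PySem.Chars.isspace c = true) :
    coreC st rm xs true = if rm then [] else (List.replicate xs.length st).flatten := by
  induction xs with
  | nil => simp [coreC]
  | cons c rest ih =>
    have hc := h c (by simp)
    have := ih fun d hd => h d (List.mem_cons_of_mem _ hd)
    cases rm <;> simp_all [coreC, List.replicate_succ]

theorem coreC_prev_irrel (st : List Char) (rm : Bool) (xs : List Char) (p : Bool)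
    (h : match xs with | [] => True | c :: _ => PySem.Chars.isspace c = false) :
    coreC st rm xs p = coreC st rm xs false := by
  cases xs with
  | nil => rfl
  | cons c rest => simp [coreC, h]

theorem prevAfterC_eq_false (xs : List Char) (h : ∀ c ∈ xs, PySem.Chars.isspace c = false) :
    prevAfterC xs false = false := by
  unfold prevAfterC
  cases hgl : xs.getLast? with
  | none => rfl
  | some d => exact h d (List.mem_of_getLast? hgl)

theorem prevAfterC_eq_true (xs : List Char) (hne : xs ≠ [])
    (h : ∀ c ∈ xs, PySem.Chars.isspace c = true) : prevAfterC xs false = true := by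
  unfold prevAfterC
  cases hgl : xs.getLast? with
  | none => exact absurd (List.getLast?_eq_none_iff.1 hgl) hne
  | some d => exact h d (List.mem_of_getLast? hgl)

theorem loopA_inv (cs st : List Char) (rm : Bool) :
    ∀ (rest done result : List Char) (lc : String) (lr : Option Nat),
      cs = done ++ rest →
      ((lc = "SPACE") ↔ prevAfterC done false = true) →
      InvLR st rm done result lr →
      InvLR st rm cs (loopA cs st rm rest done.length (result, lc, lr)).1
        (loopA cs st rm rest done.length (result, lc, lr)).2.2 := by
  intro rest
  induction rest with
  | nil =>
    intro done result lc lr hcs hlc hinv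
    rw [List.append_nil] at hcs
    subst hcs
    simpa [loopA] using hinv
  | cons c rest' ih =>
    intro done result lc lr hcs hlc hinv
    have hlen' : (done ++ [c]).length = done.length + 1 := by simp
    have hcs' : cs = (done ++ [c]) ++ rest' := by simpa using hcs
    have hslice : ∀ p : Nat, p ≤ done.length →
        PySem.List.slice cs (some (p : Int)) (some (done.length : Int)) = done.drop p := by
      intro p hp
      rw [hcs, PySem.List.slice_natCast, List.drop_append_of_le_length hp,
        List.take_append_of_le_length (by simp [List.length_drop])]
      exact List.take_of_length_le (by simp [List.length_drop])
    by_cases hc : PySem.Chars.isspace c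
    · -- current char is whitespace
      have hcat : get_category c = "SPACE" := by simp [get_category, hc]
      have hprev' : prevAfterC (done ++ [c]) false = true := by
        unfold prevAfterC
        rw [List.getLast?_concat]
        exact hc
      have hlc' : (("SPACE" : String) = "SPACE") ↔ prevAfterC (done ++ [c]) false = true := by
        simp [hprev']
      -- the value appended to result in the taken branch, as a function of lr
      have key : ∀ res', (res' = coreC st rm (done ++ [c]) false) →
          InvLR st rm cs
            (loopA cs st rm rest' (done.length + 1) (res', "SPACE", some done.length)).1
            (loopA cs st rm rest' (done.length + 1) (res', "SPACE", some done.length)).2.2 := by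
        intro res' hres'
        have hinv' : InvLR st rm (done ++ [c]) res' (some done.length) := by
          refine ⟨by simp, ?_, ?_, ?_⟩
          · rw [show (done ++ [c]).getD done.length 'x' = ([c].getD 0 'x') from by
              simp [List.getD_eq_getElem?_getD, List.getElem?_append_right (Nat.le_refl _)]]
            simpa using hc
          · intro d hd
            rw [List.drop_eq_nil_of_le (by simp : (done ++ [c]).length ≤ done.length + 1)] at hd
            simp at hd
          · rw [List.take_of_length_le (by simp), hres']
        have := ih (done ++ [c]) res' "SPACE" (some done.length) hcs' hlc' hinv'
        rwa [hlen'] at this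
      match lr, hinv with
      | none, ⟨hns, hres⟩ =>
        -- no space seen yet: last_category ≠ "SPACE", take the branch with slice from 0
        have hpf : prevAfterC done false = false := prevAfterC_eq_false done hns
        have hlcne : ¬ (lc = "SPACE") := fun h => by simp [hlc.1 h] at hpf
        simp only [loopA, hcat, reduceIte, if_pos (Or.inr hlcne)]
        refine key _ ?_
        rw [hres, coreC_append, coreC_nonspace st rm done false hns,
          prevAfterC_eq_false done hns]
        have h0 : ((0 : Int) = ((0 : Nat) : Int)) := by simp
        rw [h0, hslice 0 (Nat.zero_le _), List.drop_zero]
        simp [coreC, hc]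
      | some r, ⟨hrlt, hsp, hns, hres⟩ =>
        have hcast : ((r : Int) + 1) = (((r + 1 : Nat)) : Int) := by push_cast; ring
        by_cases hrl : r + 1 = done.length
        · -- previous char was the space at index r: last_category = "SPACE"
          have hpd : prevAfterC done false = true := by
            have hdr : done.drop r = done.getD r 'x' :: done.drop (r + 1) := by
              rw [List.getD_eq_getElem done 'x' hrlt]
              exact List.drop_eq_getElem_cons hrlt
            have hdr1 : done.drop (r + 1) = [] := by
              rw [hrl]; exact List.drop_length
            have hglast : done.getLast? = some (done.getD r 'x') := by
              have hne : done.drop r ≠ [] := by rw [hdr]; simp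
              have : done.getLast? = (done.drop r).getLast? := by
                conv_lhs => rw [← List.take_append_drop r done]
                rw [List.getLast?_append_of_ne_nil _ hne]
              rw [this, hdr, hdr1]
              rfl
            unfold prevAfterC
            rw [hglast]
            exact hsp
          have hlceq : lc = "SPACE" := hlc.2 hpd
          by_cases hrm : rm = false
          · simp only [loopA, hcat, reduceIte,
              if_pos (show (lc = "SPACE" ∧ rm = false) ∨ ¬ (lc = "SPACE") from Or.inl ⟨hlceq, hrm⟩)]
            refine key _ ?_
            rw [hres, hcast, hslice (r + 1) (Nat.le_of_eq hrl), hrl, List.drop_length,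
              coreC_append, hpd, List.take_length]
            simp [coreC, hc, hrm]
          · have hrmt : rm = true := by simpa using hrm
            have hcond : ¬ ((lc = "SPACE" ∧ rm = false) ∨ ¬ (lc = "SPACE")) :=
              fun h => h.elim (fun hp => hrm hp.2) (fun hn => hn hlceq)
            simp only [loopA, hcat, reduceIte, if_neg hcond]
            refine key _ ?_
            rw [hres, coreC_append, hpd]
            rw [List.take_of_length_le (Nat.le_of_eq hrl.symm)]
            simp [coreC, hc, hrmt]
        · -- a non-space run follows the space at r: last_category ≠ "SPACE"
          have hrl2 : r + 1 < done.length := Nat.lt_of_le_of_ne hrlt hrl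
          have hpd : prevAfterC done false = false := by
            have hne : done.drop (r + 1) ≠ [] := by
              intro h
              have := congrArg List.length h
              simp [List.length_drop] at this
              omega
            have hgl : done.getLast? = (done.drop (r + 1)).getLast? := by
              conv_lhs => rw [← List.take_append_drop (r + 1) done]
              rw [List.getLast?_append_of_ne_nil _ hne]
            unfold prevAfterC
            rw [hgl]
            cases hgl2 : (done.drop (r + 1)).getLast? with
            | none => rfl
            | some d => exact hns d (List.mem_of_getLast? hgl2)
          have hlcne : ¬ (lc = "SPACE") := fun h => by simp [hlc.1 h] at hpd
          simp only [loopA, hcat, reduceIte, if_pos (Or.inr hlcne)]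
          refine key _ ?_
          rw [hres, hcast, hslice (r + 1) (Nat.le_of_lt hrl2), coreC_append, hpd]
          have hdone : done = done.take (r + 1) ++ done.drop (r + 1) :=
            (List.take_append_drop _ _).symm
          conv_rhs => rw [hdone]
          rw [coreC_append, coreC_nonspace st rm (done.drop (r + 1)) _ hns]
          simp [coreC, hc, List.append_assoc]
    · -- current char is not whitespace
      have hcat : get_category c = "NOTSPACE" := by simp [get_category, hc]
      have hlc' : (("NOTSPACE" : String) = "SPACE") ↔ prevAfterC (done ++ [c]) false = true := by
        constructor
        · intro h; exact absurd h (by decide)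
        · intro h
          unfold prevAfterC at h
          rw [List.getLast?_concat] at h
          simp [hc] at h
      have hinv' : InvLR st rm (done ++ [c]) result lr := by
        match lr, hinv with
        | none, ⟨hns, hres⟩ =>
          refine ⟨?_, hres⟩
          intro d hd
          rcases List.mem_append.1 hd with h | h
          · exact hns d h
          · simp at h; subst h; simpa using hc
        | some r, ⟨hrlt, hsp, hns, hres⟩ =>
          refine ⟨by simp; omega, ?_, ?_, ?_⟩
          · rw [List.getD_append _ _ _ _ hrlt]; exact hsp
          · intro d hd
            rw [List.drop_append_of_le_length hrlt] at hd
            rcases List.mem_append.1 hd with h | h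
            · exact hns d h
            · simp at h; subst h; simpa using hc
          · rw [List.take_append_of_le_length hrlt]; exact hres
      simp only [loopA, hcat, reduceIte]
      have := ih (done ++ [c]) result "NOTSPACE" lr hcs' hlc' hinv'
      rwa [hlen'] at this

theorem runsOfB_all_nonspace (cs : List Char) :
    (runsOfB cs).all (fun r => r.1 = false) = true ↔ ∀ c ∈ cs, PySem.Chars.isspace c = false := by
  fun_induction runsOfB cs with
  | case1 => simp
  | case2 c rest sp ih =>
    have hspv : sp = PySem.Chars.isspace c := rfl
    clear_value sp
    constructor
    · intro h d hd
      simp only [List.all_cons, Bool.and_eq_true, decide_eq_true_eq] at h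
      obtain ⟨hsp0, hrec⟩ := h
      rcases List.mem_cons.1 hd with rfl | hd'
      · rw [← hspv]; exact hsp0
      · rcases List.mem_append.1 (by
            rw [List.takeWhile_append_dropWhile (p := fun d => decide (PySem.Chars.isspace d = sp))]
            exact hd') with h | h
        · have := List.mem_takeWhile_imp h
          simp only [decide_eq_true_eq] at this
          rw [this]; exact hsp0
        · exact (ih.1 hrec) d h
    · intro h
      have hc : sp = false := by rw [hspv]; exact h c (by simp)
      simp only [List.all_cons, Bool.and_eq_true, decide_eq_true_eq]
      refine ⟨hc, ih.2 ?_⟩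
      intro d hd
      refine h d (List.mem_cons_of_mem _ ?_)
      rw [← List.takeWhile_append_dropWhile (p := fun d => decide (PySem.Chars.isspace d = sp)) (l := rest)]
      exact List.mem_append_right _ hd

theorem B_core (st : List Char) (rm : Bool) (cs : List Char) :
    ((runsOfB cs).map (fun r =>
      if r.1 = false then r.2
      else if rm then st
      else (List.replicate r.2.length st).flatten)).flatten = coreC st rm cs false := by
  fun_induction runsOfB cs with
  | case1 => simp [coreC]
  | case2 c rest sp ih =>
    have hspv : sp = PySem.Chars.isspace c := rfl
    clear_value sp
    have hsplit : coreC st rm (c :: rest) false =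
        coreC st rm (c :: rest.takeWhile (fun d => decide (PySem.Chars.isspace d = sp))) false ++
        coreC st rm (rest.dropWhile (fun d => decide (PySem.Chars.isspace d = sp)))
          (prevAfterC (c :: rest.takeWhile (fun d => decide (PySem.Chars.isspace d = sp))) false) := by
      conv_lhs => rw [show (c :: rest) =
        (c :: rest.takeWhile (fun d => decide (PySem.Chars.isspace d = sp))) ++
          rest.dropWhile (fun d => decide (PySem.Chars.isspace d = sp)) from by
        simp [List.takeWhile_append_dropWhile]]
      exact coreC_append _ _ _ _ _
    have htw : ∀ d ∈ rest.takeWhile (fun d => decide (PySem.Chars.isspace d = sp)),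
        PySem.Chars.isspace d = sp := by
      intro d hd
      have := List.mem_takeWhile_imp hd
      simpa using this
    cases hb : PySem.Chars.isspace c with
    | false =>
      have hspf : sp = false := by rw [hspv, hb]
      subst hspf
      have hall : ∀ d ∈ c :: rest.takeWhile (fun d => decide (PySem.Chars.isspace d = false)),
          PySem.Chars.isspace d = false := by
        intro d hd
        rcases List.mem_cons.1 hd with rfl | hd'
        · exact hb
        · exact htw d hd'
      rw [List.map_cons, List.flatten_cons, hsplit, ih, prevAfterC_eq_false _ hall]
      congr 1
      simp only [reduceIte]
      exact (coreC_nonspace st rm _ false hall).symm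
    | true =>
      have hspt : sp = true := by rw [hspv, hb]
      subst hspt
      have hall : ∀ d ∈ c :: rest.takeWhile (fun d => decide (PySem.Chars.isspace d = true)),
          PySem.Chars.isspace d = true := by
        intro d hd
        rcases List.mem_cons.1 hd with rfl | hd'
        · exact hb
        · exact htw d hd'
      have hdrop : coreC st rm (rest.dropWhile (fun d => decide (PySem.Chars.isspace d = true))) true
          = coreC st rm (rest.dropWhile (fun d => decide (PySem.Chars.isspace d = true))) false := by
        refine coreC_prev_irrel st rm _ true ?_
        cases hdw : rest.dropWhile (fun d => decide (PySem.Chars.isspace d = true)) with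
        | nil => trivial
        | cons d tl =>
          have := List.head_dropWhile_not (fun d => decide (PySem.Chars.isspace d = true))
            (l := rest) (by rw [hdw]; simp)
          simp only [hdw, List.head_cons, decide_eq_true_eq] at this
          simpa using this
      rw [List.map_cons, List.flatten_cons, hsplit,
        prevAfterC_eq_true _ (by simp) hall, hdrop, ih]
      congr 1
      have htws : ∀ d ∈ rest.takeWhile (fun d => decide (PySem.Chars.isspace d = true)),
          PySem.Chars.isspace d = true := fun d hd => htw d hd
      simp only [coreC, hb, if_true, Bool.false_and, Bool.false_eq_true, if_false]
      rw [coreC_allspace st rm _ htws]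
      cases rm with
      | true => simp
      | false => simp [List.replicate_succ]

-- ===== VERDICT (by name: the statement is the Claim_ definition above) =====
theorem norm_spaces_spec : Claim_equal_norm_spaces := by
  unfold Claim_equal_norm_spaces
  intro input_str space_type rm _hdom
  unfold Spec_norm_spaces norm_spaces norm_spaces_alt
  by_cases h0 : input_str.toList.length = 0
  · simp [h0]
  · simp only [h0, if_false]
    have hinv := loopA_inv input_str.toList space_type.toList rm input_str.toList [] [] "" none
      (by simp) (by simp [prevAfterC]) ⟨by simp, rfl⟩
    simp only [List.length_nil] at hinv
    rcases hout : loopA input_str.toList space_type.toList rm input_str.toList 0 ([], "", none)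
      with ⟨result, lc, lr⟩
    rw [hout] at hinv
    dsimp only at hinv
    cases lr with
    | none =>
      obtain ⟨hns, -⟩ := hinv
      have hall : (runsOfB input_str.toList).all (fun r => r.1 = false) = true :=
        (runsOfB_all_nonspace _).2 hns
      rw [if_pos hall]
    | some r =>
      obtain ⟨hrlt, hsp, hnsuf, hres⟩ := hinv
      have hmem : input_str.toList.getD r 'x' ∈ input_str.toList := by
        rw [List.getD_eq_getElem _ 'x' hrlt]; exact List.getElem_mem hrlt
      have hnall : ¬ ((runsOfB input_str.toList).all (fun r => r.1 = false) = true) := by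
        intro h
        have := (runsOfB_all_nonspace _).1 h _ hmem
        rw [hsp] at this
        simp at this
      have hR := B_core space_type.toList rm input_str.toList
      have hfinal : (if r < input_str.toList.length - 1 then
            result ++ PySem.List.slice input_str.toList (some ((r : Int) + 1)) none
          else result) = coreC space_type.toList rm input_str.toList false := by
        by_cases hr : r < input_str.toList.length - 1
        · rw [if_pos hr, hres]
          have hcast : ((r : Int) + 1) = (((r + 1 : Nat)) : Int) := by push_cast; ring
          rw [hcast, PySem.List.slice_from_natCast]
          conv_rhs => rw [← List.take_append_drop (r + 1) input_str.toList]
          rw [coreC_append, coreC_nonspace _ _ _ _ hnsuf]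
        · rw [if_neg hr, hres, List.take_of_length_le (by omega)]
      simp only [hnall, hfinal, hR]
      cases rm with
      | false => simp
      | true => simp
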